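-- pv_equiv track=rewrite | github.com/Chen12358/Test-time | demo.py | convert_to_latex
-- ===== SOURCE A (Python) =====
-- def convert_to_latex(text):
--     # Split the text into blocks based on code blocks
--     blocks = []
--     current_block = ""
--     in_code_block = False
--     code_type = ""
--
--     lines = text.split('\n')
--     i = 0
--     while i < len(lines):
--         line = lines[i]
--
--         # Check for code block start
--         if line.startswith('```'):
--             if in_code_block:
--                 # End current code block
--                 blocks.append((code_type, current_block.rstrip()))
--                 current_block = ""
--                 in_code_block = False
--                 i += 1
--                 continue
--             else:
--                 # Start new code block
--                 if current_block:
--                     blocks.append(("natural", current_block.rstrip()))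
--                     current_block = ""
--                 code_type = line[3:].strip() if line[3:].strip() else "tactics"
--                 in_code_block = True
--                 i += 1
--                 continue
--
--         current_block += line + "\n"
--         i += 1
--
--     # Add final block if exists
--     if current_block:
--         blocks.append(("natural" if not in_code_block else code_type, current_block.rstrip()))
--
--     # Convert blocks to LaTeX
--     latex_output = ""
--     for block_type, content in blocks:
--         if block_type == "lean4":
--             latex_output += "\\begin{answer}\n\\begin{lstlisting}[language=lean,belowskip=-6pt]\n"
--             latex_output += content
--             latex_output += "\n\\end{lstlisting}\n\\end{answer}\n\n"
--         elif block_type == "tactics" or block_type == "lemma":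
--             latex_output += "\\begin{question}\n\\begin{lstlisting}[language=lean,belowskip=-6pt]\n"
--             latex_output += content
--             latex_output += "\n\\end{lstlisting}\n\\end{question}\n\n"
--         else:  # natural
--             latex_output += "\\begin{thought}\n\\begin{lstlisting}[language=prompt,belowskip=-6pt]\n"
--             latex_output += content
--             latex_output += "\n\\end{lstlisting}\n\\end{thought}\n\n"
--
--     return latex_output.strip()
-- ===== SOURCE B (Python) =====
-- def convert_to_latex(text):
--     # Recursive descent over fence-delimited segments (no state flags / char buffer / blocks list).
--     def render(t, content):
--         if t == "lean4":
--             return "\\begin{answer}\n\\begin{lstlisting}[language=lean,belowskip=-6pt]\n" + content + "\n\\end{lstlisting}\n\\end{answer}\n\n"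
--         elif t == "tactics" or t == "lemma":
--             return "\\begin{question}\n\\begin{lstlisting}[language=lean,belowskip=-6pt]\n" + content + "\n\\end{lstlisting}\n\\end{question}\n\n"
--         else:
--             return "\\begin{thought}\n\\begin{lstlisting}[language=prompt,belowskip=-6pt]\n" + content + "\n\\end{lstlisting}\n\\end{thought}\n\n"
--
--     def split_fence(lines):
--         # split at the first fence line: (before, fence_line, after), or None
--         for i, l in enumerate(lines):
--             if l.startswith('```'):
--                 return lines[:i], l, lines[i + 1:]
--         return None
--
--     def go(lines):
--         s = split_fence(lines)
--         if s is None: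
--             return [render("natural", '\n'.join(lines).rstrip())] if lines else []
--         pre, fl, rest = s
--         head = [render("natural", '\n'.join(pre).rstrip())] if pre else []
--         t = fl[3:].strip() or "tactics"
--         s2 = split_fence(rest)
--         if s2 is None:
--             return head + ([render(t, '\n'.join(rest).rstrip())] if rest else [])
--         seg, _, rest2 = s2
--         return head + [render(t, '\n'.join(seg).rstrip())] + go(rest2)
--
--     return ''.join(go(text.split('\n'))).strip()
-- ===== Notes on version B (the rewrite author's own statement) =====
-- stated objective: alternative
-- what changed: Replaced A's stateful while loop (in_code_block flag, growing current_block string, intermediate blocks list rendered by a second loop) with a recursive descent that repeatedly splits the line list at the next fence line and renders each delimited segment directly, recursing on the remainder.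
import Mathlib
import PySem

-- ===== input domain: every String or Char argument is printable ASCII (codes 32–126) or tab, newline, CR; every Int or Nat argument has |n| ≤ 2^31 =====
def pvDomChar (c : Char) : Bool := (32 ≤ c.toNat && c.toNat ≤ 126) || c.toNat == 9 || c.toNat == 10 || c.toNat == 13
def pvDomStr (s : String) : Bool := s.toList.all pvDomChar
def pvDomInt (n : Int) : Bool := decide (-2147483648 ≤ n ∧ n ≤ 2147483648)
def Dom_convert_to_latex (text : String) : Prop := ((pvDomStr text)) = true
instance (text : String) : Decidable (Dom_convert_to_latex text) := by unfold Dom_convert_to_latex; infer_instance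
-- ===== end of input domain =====

-- B replaces A's stateful while loop + blocks list with a recursive descent splitting
-- the lines at each fence; objective: alternative decomposition, same cost.

-- ===== PORT A =====
-- A's second loop body: latex_output += header; += content; += footer, branching on the block type.
def pvRenderA (acc : String) (bt : String) (content : String) : String :=
  if bt == "lean4" then
    acc ++ "\\begin{answer}\n\\begin{lstlisting}[language=lean,belowskip=-6pt]\n" ++ content ++ "\n\\end{lstlisting}\n\\end{answer}\n\n"
  else if bt == "tactics" || bt == "lemma" then
    acc ++ "\\begin{question}\n\\begin{lstlisting}[language=lean,belowskip=-6pt]\n" ++ content ++ "\n\\end{lstlisting}\n\\end{question}\n\n"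
  else
    acc ++ "\\begin{thought}\n\\begin{lstlisting}[language=prompt,belowskip=-6pt]\n" ++ content ++ "\n\\end{lstlisting}\n\\end{thought}\n\n"

-- A's while loop over lines: state (blocks, current_block, in_code_block, code_type).
def pvStepA : List (String × String) × String × Bool × String → String →
    List (String × String) × String × Bool × String
  | (blocks, cur, inCode, ctype), line =>
    if PySem.Str.startswith line "```" then
      if inCode then
        (blocks ++ [(ctype, PySem.Str.rstrip cur)], "", false, ctype)
      else
        let blocks' := if cur ≠ "" then blocks ++ [("natural", PySem.Str.rstrip cur)] else blocks
        let t := PySem.Str.strip (PySem.Str.slice line (some 3) none)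
        (blocks', "", true, if t ≠ "" then t else "tactics")
    else
      (blocks, cur ++ line ++ "\n", inCode, ctype)

def convert_to_latex (text : String) : String :=
  let lines := (PySem.Str.split? text "\n").getD []   -- sep "\n" is nonempty: split? is always `some` here
  let r := lines.foldl pvStepA ([], "", false, "")
  let blocks :=
    if r.2.1 ≠ "" then
      r.1 ++ [((if r.2.2.1 then r.2.2.2 else "natural"), PySem.Str.rstrip r.2.1)]
    else r.1
  PySem.Str.strip (blocks.foldl (fun acc b => pvRenderA acc b.1 b.2) "")

-- ===== PORT B =====
-- B's render helper: the finished environment for one segment's content.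
def pvRenderB (bt : String) (content : String) : String :=
  if bt == "lean4" then
    "\\begin{answer}\n\\begin{lstlisting}[language=lean,belowskip=-6pt]\n" ++ content ++ "\n\\end{lstlisting}\n\\end{answer}\n\n"
  else if bt == "tactics" || bt == "lemma" then
    "\\begin{question}\n\\begin{lstlisting}[language=lean,belowskip=-6pt]\n" ++ content ++ "\n\\end{lstlisting}\n\\end{question}\n\n"
  else
    "\\begin{thought}\n\\begin{lstlisting}[language=prompt,belowskip=-6pt]\n" ++ content ++ "\n\\end{lstlisting}\n\\end{thought}\n\n"

-- B's split_fence: (lines before the first fence line, that line, lines after), or none.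
def pvSplitFence : List String → Option (List String × String × List String)
  | [] => none
  | l :: ls =>
    if PySem.Str.startswith l "```" then some ([], l, ls)
    else (pvSplitFence ls).map (fun p => (l :: p.1, p.2.1, p.2.2))

-- termination bound for goB (cited by decreasing_by below)
theorem pvSplitFence_length : ∀ (xs : List String) (p : List String) (f : String)
    (r : List String), pvSplitFence xs = some (p, f, r) → r.length < xs.length := by
  intro xs
  induction xs with
  | nil => intro p f r h; simp [pvSplitFence] at h
  | cons l ls ih =>
    intro p f r h
    by_cases hl : PySem.Str.startswith l "```" = true
    · simp only [pvSplitFence, if_pos hl, Option.some.injEq, Prod.mk.injEq] at h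
      obtain ⟨-, -, h3⟩ := h
      subst h3
      simp
    · simp only [pvSplitFence, if_neg hl] at h
      cases hs : pvSplitFence ls with
      | none => rw [hs] at h; simp at h
      | some q =>
        obtain ⟨p', f', r'⟩ := q
        rw [hs] at h
        simp only [Option.map_some, Option.some.injEq, Prod.mk.injEq] at h
        obtain ⟨-, -, h3⟩ := h
        subst h3
        have := ih p' f' r' hs
        simp only [List.length_cons]
        omega

-- B's go: render segments recursively, splitting at each fence.
def pvGoB (lines : List String) : List String :=
  match h : pvSplitFence lines with
  | none =>
    if lines ≠ [] then [pvRenderB "natural" (PySem.Str.rstrip (PySem.Str.join "\n" lines))] else []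
  | some (pre, fl, rest) =>
    let head := if pre ≠ [] then [pvRenderB "natural" (PySem.Str.rstrip (PySem.Str.join "\n" pre))] else []
    let t0 := PySem.Str.strip (PySem.Str.slice fl (some 3) none)
    let t := if t0 == "" then "tactics" else t0
    match h2 : pvSplitFence rest with
    | none => head ++ (if rest ≠ [] then [pvRenderB t (PySem.Str.rstrip (PySem.Str.join "\n" rest))] else [])
    | some (seg, _, rest2) =>
      head ++ [pvRenderB t (PySem.Str.rstrip (PySem.Str.join "\n" seg))] ++ pvGoB rest2
termination_by lines.length
decreasing_by
  exact Nat.lt_trans (pvSplitFence_length _ _ _ _ h2) (pvSplitFence_length _ _ _ _ h)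

def convert_to_latex_alt (text : String) : String :=
  let lines := (PySem.Str.split? text "\n").getD []   -- sep "\n" is nonempty: split? is always `some` here
  PySem.Str.strip (String.join (pvGoB lines))         -- ''.join = String.join

-- ===== PRECONDITION & SPEC =====
def Spec_convert_to_latex (text : String) (out : String) : Prop := out = convert_to_latex_alt text
instance (text : String) (out : String) : Decidable (Spec_convert_to_latex text out) := by unfold Spec_convert_to_latex; infer_instance

-- ===== CLAIM (what is proved, stated in full; the proofs are below) =====
def Claim_equal_convert_to_latex : Prop := ∀ (text : String), Dom_convert_to_latex text → Spec_convert_to_latex text (convert_to_latex text)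

-- ===== LEMMAS AND PROOFS =====

theorem str_ext {s t : String} (h : s.toList = t.toList) : s = t := by
  have := congrArg String.ofList h
  simpa [String.ofList_toList] using this

-- A's current_block, expressed from the list of buffered lines.
def pvBufStr (buf : List String) : String :=
  if buf = [] then "" else PySem.Str.join "\n" buf ++ "\n"

theorem bufStr_empty_iff (buf : List String) : pvBufStr buf = "" ↔ buf = [] := by
  unfold pvBufStr
  split
  · simp_all
  · constructor
    · intro h
      have := congrArg String.toList h
      simp [String.toList_append] at this
    · intro h; simp_all

theorem rstrip_newline (s : String) : PySem.Str.rstrip (s ++ "\n") = PySem.Str.rstrip s := by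
  apply str_ext
  simp only [PySem.Str.toList_rstrip, String.toList_append]
  rw [show ("\n" : String).toList = ['\n'] from rfl]
  unfold PySem.Chars.rstrip
  rw [List.reverse_append]
  simp [show PySem.Chars.isspace '\n' = true from by decide]

theorem rstrip_bufStr (buf : List String) :
    PySem.Str.rstrip (pvBufStr buf) = PySem.Str.rstrip (PySem.Str.join "\n" buf) := by
  unfold pvBufStr
  split
  · subst ‹buf = []›
    rfl
  · exact rstrip_newline _

theorem chars_join_snoc (sep x l : List Char) (bs : List (List Char)) :
    PySem.Chars.join sep (x :: bs ++ [l]) = PySem.Chars.join sep (x :: bs) ++ sep ++ l := by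
  induction bs generalizing x with
  | nil =>
    rw [show (x :: [] ++ [l] : List (List Char)) = [x, l] from rfl, PySem.Chars.join_cons_cons,
      PySem.Chars.join_singleton, PySem.Chars.join_singleton]
  | cons y ys ih =>
    simp only [List.cons_append] at ih ⊢
    rw [PySem.Chars.join_cons_cons, ih y, PySem.Chars.join_cons_cons]
    simp [List.append_assoc]

theorem bufStr_append (buf : List String) (l : String) :
    pvBufStr (buf ++ [l]) = pvBufStr buf ++ l ++ "\n" := by
  cases buf with
  | nil =>
    apply str_ext
    simp [pvBufStr, String.toList_append, PySem.Str.toList_join, PySem.Chars.join_singleton]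
  | cons x xs =>
    apply str_ext
    simp only [pvBufStr, List.cons_append,
      if_neg (by simp : ¬(x :: (xs ++ [l])) = ([] : List String)),
      if_neg (by simp : ¬(x :: xs) = ([] : List String))]
    simp only [String.toList_append, PySem.Str.toList_join, List.map_cons, List.map_append,
      List.map_nil]
    rw [← List.cons_append, chars_join_snoc]

-- the rendered output of A's second loop
def pvRenderBlocks (blocks : List (String × String)) : String :=
  blocks.foldl (fun acc b => pvRenderA acc b.1 b.2) ""

theorem renderA_eq (acc bt content : String) :
    pvRenderA acc bt content = acc ++ pvRenderB bt content := by
  unfold pvRenderA pvRenderB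
  split_ifs <;> simp [String.append_assoc]

theorem renderBlocks_snoc (blocks : List (String × String)) (b : String × String) :
    pvRenderBlocks (blocks ++ [b]) = pvRenderBlocks blocks ++ pvRenderB b.1 b.2 := by
  unfold pvRenderBlocks
  rw [List.foldl_append]
  simp [renderA_eq]

-- fence-free lines only grow the buffer (both inside and outside a code block)
theorem foldl_free (pre : List String) (hfree : ∀ l ∈ pre, PySem.Str.startswith l "```" = false) :
    ∀ (blocks : List (String × String)) (buf : List String) (ic : Bool) (ct : String),
    pre.foldl pvStepA (blocks, pvBufStr buf, ic, ct) = (blocks, pvBufStr (buf ++ pre), ic, ct) := by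
  induction pre with
  | nil => intro blocks buf ic ct; simp
  | cons l ls ih =>
    intro blocks buf ic ct
    have hl : PySem.Str.startswith l "```" = false := hfree l (by simp)
    simp only [List.foldl_cons, pvStepA, hl, Bool.false_eq_true, if_false]
    rw [← bufStr_append buf l]
    rw [ih (fun x hx => hfree x (by simp [hx])) blocks (buf ++ [l]) ic ct]
    simp

theorem splitFence_none : ∀ (xs : List String), pvSplitFence xs = none →
    ∀ l ∈ xs, PySem.Str.startswith l "```" = false := by
  intro xs
  induction xs with
  | nil => simp
  | cons l ls ih =>
    intro h x hx
    by_cases hl : PySem.Str.startswith l "```" = true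
    · simp only [pvSplitFence, if_pos hl] at h
      simp at h
    · simp only [pvSplitFence, if_neg hl] at h
      cases hs : pvSplitFence ls with
      | some q => rw [hs] at h; simp at h
      | none =>
        rcases List.mem_cons.mp hx with rfl | hx
        · simpa using hl
        · exact ih hs x hx

theorem splitFence_some : ∀ (xs p : List String) (f : String) (r : List String),
    pvSplitFence xs = some (p, f, r) →
    xs = p ++ f :: r ∧ (∀ l ∈ p, PySem.Str.startswith l "```" = false) ∧
      PySem.Str.startswith f "```" = true := by
  intro xs
  induction xs with
  | nil => intro p f r h; simp [pvSplitFence] at h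
  | cons l ls ih =>
    intro p f r h
    by_cases hl : PySem.Str.startswith l "```" = true
    · simp only [pvSplitFence, if_pos hl, Option.some.injEq, Prod.mk.injEq] at h
      obtain ⟨h1, h2, h3⟩ := h
      subst h1; subst h2; subst h3
      exact ⟨rfl, by simp, hl⟩
    · simp only [pvSplitFence, if_neg hl] at h
      cases hs : pvSplitFence ls with
      | none => rw [hs] at h; simp at h
      | some q =>
        obtain ⟨p', f', r'⟩ := q
        rw [hs] at h
        simp only [Option.map_some, Option.some.injEq, Prod.mk.injEq] at h
        obtain ⟨h1, h2, h3⟩ := h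
        subst h1; subst h2; subst h3
        obtain ⟨hxs, hfree, hf⟩ := ih p' f' r' hs
        refine ⟨by simp [hxs], ?_, hf⟩
        intro x hx
        rcases List.mem_cons.mp hx with rfl | hx
        · simpa using hl
        · exact hfree x hx

theorem pvBufStr_nil : pvBufStr [] = "" := rfl

-- foldl_free from the empty buffer
theorem foldl_free0 (pre : List String)
    (hfree : ∀ l ∈ pre, PySem.Str.startswith l "```" = false)
    (blocks : List (String × String)) (ic : Bool) (ct : String) :
    pre.foldl pvStepA (blocks, "", ic, ct) = (blocks, pvBufStr pre, ic, ct) := by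
  have h := foldl_free pre hfree blocks [] ic ct
  rw [pvBufStr_nil] at h
  simpa using h

-- A's finalization: append the trailing block (if any) and render everything.
def pvFinishA (r : List (String × String) × String × Bool × String) : String :=
  pvRenderBlocks
    (if r.2.1 ≠ "" then
      r.1 ++ [((if r.2.2.1 then r.2.2.2 else "natural"), PySem.Str.rstrip r.2.1)]
    else r.1)

theorem finishA_pos (blocks : List (String × String)) (cur : String) (ic : Bool) (ct : String)
    (h : cur ≠ "") :
    pvFinishA (blocks, cur, ic, ct) =
      pvRenderBlocks blocks ++ pvRenderB (if ic then ct else "natural") (PySem.Str.rstrip cur) := by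
  simp only [pvFinishA, ne_eq, h, not_false_iff, if_pos]
  rw [renderBlocks_snoc]

theorem finishA_neg (blocks : List (String × String)) (ic : Bool) (ct : String) :
    pvFinishA (blocks, "", ic, ct) = pvRenderBlocks blocks := by
  simp [pvFinishA]

theorem join_append (a b : List String) : String.join (a ++ b) = String.join a ++ String.join b := by
  apply str_ext
  simp [String.toList_append]

theorem join_nil : String.join [] = "" := rfl

theorem join_cons (x : String) (l : List String) :
    String.join (x :: l) = x ++ String.join l := by
  apply str_ext
  simp [String.toList_append]

theorem join_singleton (x : String) : String.join [x] = x := by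
  apply str_ext
  simp

theorem empty_append (s : String) : "" ++ s = s := by
  apply str_ext
  simp [String.toList_append]

theorem append_empty (s : String) : s ++ "" = s := by
  apply str_ext
  simp [String.toList_append]

-- the type chosen at an opening fence: A's and B's spellings agree
theorem fence_type_eq (t0 : String) :
    (if t0 ≠ "" then t0 else "tactics") = (if t0 == "" then "tactics" else t0) := by
  by_cases h : t0 = "" <;> simp [h]

-- pvStepA on a fence line, outside a code block
theorem stepA_open (blocks : List (String × String)) (cur ct line : String)
    (hl : PySem.Str.startswith line "```" = true) :
    pvStepA (blocks, cur, false, ct) line =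
      ((if cur ≠ "" then blocks ++ [("natural", PySem.Str.rstrip cur)] else blocks), "", true,
       (if PySem.Str.strip (PySem.Str.slice line (some 3) none) ≠ ""
        then PySem.Str.strip (PySem.Str.slice line (some 3) none) else "tactics")) := by
  have hl' : PySem.Chars.startswith line.toList ['`', '`', '`'] = true := by simpa using hl
  simp [pvStepA, hl']

-- pvStepA on a fence line, inside a code block
theorem stepA_close (blocks : List (String × String)) (cur ct line : String)
    (hl : PySem.Str.startswith line "```" = true) :
    pvStepA (blocks, cur, true, ct) line = (blocks ++ [(ct, PySem.Str.rstrip cur)], "", false, ct) := by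
  have hl' : PySem.Chars.startswith line.toList ['`', '`', '`'] = true := by simpa using hl
  simp [pvStepA, hl']

-- pvGoB unfolding equations
theorem pvGoB_none (lines : List String) (h : pvSplitFence lines = none) :
    pvGoB lines =
      if lines ≠ [] then [pvRenderB "natural" (PySem.Str.rstrip (PySem.Str.join "\n" lines))]
      else [] := by
  unfold pvGoB
  split
  · rfl
  · next heq => rw [h] at heq; cases heq

theorem pvGoB_some_none (lines pre : List String) (fl : String) (rest : List String)
    (h : pvSplitFence lines = some (pre, fl, rest)) (h2 : pvSplitFence rest = none) :
    pvGoB lines =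
      (if pre ≠ [] then [pvRenderB "natural" (PySem.Str.rstrip (PySem.Str.join "\n" pre))] else []) ++
      (if rest ≠ [] then
        [pvRenderB
          (if PySem.Str.strip (PySem.Str.slice fl (some 3) none) == "" then "tactics"
           else PySem.Str.strip (PySem.Str.slice fl (some 3) none))
          (PySem.Str.rstrip (PySem.Str.join "\n" rest))]
       else []) := by
  unfold pvGoB
  split
  · next heq => rw [h] at heq; cases heq
  · next p' f' r' heq =>
    rw [h] at heq
    simp only [Option.some.injEq, Prod.mk.injEq] at heq
    obtain ⟨h1, hf1, h3⟩ := heq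
    subst h1; subst hf1; subst h3
    dsimp only
    split
    · rfl
    · next s' c' r2' heq2 => rw [h2] at heq2; cases heq2

theorem pvGoB_some_some (lines pre : List String) (fl : String) (rest seg : List String)
    (cl : String) (rest2 : List String)
    (h : pvSplitFence lines = some (pre, fl, rest)) (h2 : pvSplitFence rest = some (seg, cl, rest2)) :
    pvGoB lines =
      (if pre ≠ [] then [pvRenderB "natural" (PySem.Str.rstrip (PySem.Str.join "\n" pre))] else []) ++
      [pvRenderB
        (if PySem.Str.strip (PySem.Str.slice fl (some 3) none) == "" then "tactics"
         else PySem.Str.strip (PySem.Str.slice fl (some 3) none))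
        (PySem.Str.rstrip (PySem.Str.join "\n" seg))] ++ pvGoB rest2 := by
  unfold pvGoB
  split
  · next heq => rw [h] at heq; cases heq
  · next p' f' r' heq =>
    rw [h] at heq
    simp only [Option.some.injEq, Prod.mk.injEq] at heq
    obtain ⟨h1, hf1, h3⟩ := heq
    subst h1; subst hf1; subst h3
    dsimp only
    split
    · next heq2 => rw [h2] at heq2; cases heq2
    · next s' c' r2' heq2 =>
      rw [h2] at heq2
      simp only [Option.some.injEq, Prod.mk.injEq] at heq2
      obtain ⟨g1, g2, g3⟩ := heq2
      subst g1; subst g2; subst g3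
      conv_rhs => rw [← pvGoB.eq_def]

-- Main invariant: from a clean (outside-fence, empty-buffer) state, A's remaining run
-- renders exactly B's recursive descent on the remaining lines.
theorem main_lemma : ∀ (n : Nat) (lines : List String), lines.length ≤ n →
    ∀ (blocks : List (String × String)) (ct : String),
    pvFinishA (lines.foldl pvStepA (blocks, "", false, ct)) =
      pvRenderBlocks blocks ++ String.join (pvGoB lines) := by
  intro n
  induction n with
  | zero =>
    intro lines hlen blocks ct
    have : lines = [] := List.eq_nil_of_length_eq_zero (Nat.le_zero.mp hlen)
    subst this
    simp [pvGoB, pvSplitFence, pvFinishA, String.join]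
  | succ n ih =>
    intro lines hlen blocks ct
    cases hsf : pvSplitFence lines with
    | none =>
      have hfree := splitFence_none lines hsf
      rw [foldl_free0 lines hfree blocks false ct, pvGoB_none lines hsf]
      by_cases hl : lines = []
      · subst hl
        rw [pvBufStr_nil, finishA_neg]
        simp [join_nil, join_singleton, empty_append, append_empty]
      · have hne : pvBufStr lines ≠ "" := fun hh => hl ((bufStr_empty_iff lines).mp hh)
        rw [finishA_pos blocks _ false ct hne, rstrip_bufStr]
        simp [hl, join_singleton, empty_append, append_empty]
    | some s =>
      obtain ⟨pre, fl, rest⟩ := s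
      obtain ⟨hxs, hfree, hf⟩ := splitFence_some lines pre fl rest hsf
      subst hxs
      rw [List.foldl_append, List.foldl_cons, foldl_free0 pre hfree blocks false ct,
        stepA_open blocks _ ct fl hf]
      set t0 := PySem.Str.strip (PySem.Str.slice fl (some 3) none) with ht0
      set blocks' := if pvBufStr pre ≠ "" then blocks ++ [("natural", PySem.Str.rstrip (pvBufStr pre))] else blocks with hb'
      set tA := if t0 ≠ "" then t0 else "tactics" with htA
      -- head rendering agrees
      have hhead : pvRenderBlocks blocks' = pvRenderBlocks blocks ++
          String.join (if pre ≠ [] then [pvRenderB "natural" (PySem.Str.rstrip (PySem.Str.join "\n" pre))] else []) := by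
        by_cases hp : pre = []
        · simp [hb', hp, pvBufStr_nil, String.join]
        · have hne : pvBufStr pre ≠ "" := fun hh => hp ((bufStr_empty_iff pre).mp hh)
          rw [hb', if_pos hne, renderBlocks_snoc, rstrip_bufStr]
          simp [hp, join_singleton, empty_append, append_empty]
      cases hsf2 : pvSplitFence rest with
      | none =>
        have hfree2 := splitFence_none rest hsf2
        rw [foldl_free0 rest hfree2 blocks' true tA,
          pvGoB_some_none (pre ++ fl :: rest) pre fl rest hsf hsf2]
        by_cases hr : rest = []
        · subst hr
          rw [pvBufStr_nil, finishA_neg]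
          simp [hhead, join_append, join_nil, join_singleton, empty_append, append_empty]
        · have hne : pvBufStr rest ≠ "" := fun hh => hr ((bufStr_empty_iff rest).mp hh)
          rw [finishA_pos blocks' _ true tA hne, rstrip_bufStr, hhead]
          simp [hr, join_append, join_singleton, empty_append, append_empty, htA, ht0, fence_type_eq, String.append_assoc]
      | some s2 =>
        obtain ⟨seg, cl, rest2⟩ := s2
        obtain ⟨hxs2, hfree2, hcl⟩ := splitFence_some rest seg cl rest2 hsf2
        subst hxs2
        rw [List.foldl_append, List.foldl_cons, foldl_free0 seg hfree2 blocks' true tA,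
          stepA_close blocks' _ tA cl hcl]
        have hlen2 : rest2.length ≤ n := by
          simp only [List.length_append, List.length_cons] at hlen
          omega
        rw [ih rest2 hlen2 (blocks' ++ [(tA, PySem.Str.rstrip (pvBufStr seg))]) tA,
          renderBlocks_snoc, rstrip_bufStr, hhead,
          pvGoB_some_some (pre ++ fl :: (seg ++ cl :: rest2)) pre fl (seg ++ cl :: rest2) seg cl rest2 hsf hsf2]
        simp [join_append, join_cons, join_singleton, empty_append, append_empty, htA, ht0, fence_type_eq, String.append_assoc]

-- ===== VERDICT (by name: the statement is the Claim_ definition above) =====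
theorem convert_to_latex_spec : Claim_equal_convert_to_latex := by
  intro text _
  show convert_to_latex text = convert_to_latex_alt text
  simp only [convert_to_latex, convert_to_latex_alt]
  have h := main_lemma (((PySem.Str.split? text "\n").getD []).length)
    ((PySem.Str.split? text "\n").getD []) le_rfl [] ""
  simp only [pvFinishA, pvRenderBlocks, List.foldl_nil] at h
  rw [h, empty_append]
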